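-- pv_equiv track=rewrite | github.com/fuzzing-static-analysis/fuzzing-static-analysis | feature/feature/util.py | get_struct_member_freq
-- ===== SOURCE A (Python) =====
-- def get_struct_member_freq(lks_data, struct_name):
--     int_freq = 0
--     ptr_freq = 0
--     struct_freq = 0
--     array_freq = 0
--     double_freq = 0
--     float_freq = 0
--     total_freq = 0
--     if struct_name == "":
--         # This struct doesn't have any name
--         # It could be std::make_pair() or something
--         pass
--     else:
--         data = lks_data[struct_name]
--         for (idnum, freq) in data["desc"]:
--             total_freq += freq
--             if idnum == 13:
--                 # int
--                 int_freq += freq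
--             elif idnum == 15:
--                 # ptr
--                 ptr_freq += freq
--             elif idnum == 16:
--                 # struct
--                 struct_freq += freq
--             elif idnum == 17:
--                 # array
--                 array_freq += freq
--             elif idnum == 3:
--                 # double
--                 double_freq += freq
--             elif idnum == 2:
--                 # float
--                 float_freq += freq
--             else:
--                 raise Exception("Unknown Type")
--
--     return (
--         int_freq,
--         ptr_freq,
--         struct_freq,
--         array_freq,
--         double_freq,
--         float_freq,
--         total_freq)
-- ===== SOURCE B (Python) =====
-- def get_struct_member_freq(lks_data, struct_name):
--     desc = [] if struct_name == "" else lks_data[struct_name]["desc"]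
--     if not set(i for i, _ in desc) <= {13, 15, 16, 17, 3, 2}:
--         raise Exception("Unknown Type")
--     def tally(code):
--         return sum(f for i, f in desc if i == code)
--     return (tally(13), tally(15), tally(16), tally(17), tally(3), tally(2),
--             sum(f for _, f in desc))
-- ===== Notes on version B (the rewrite author's own statement) =====
-- stated objective: simpler
-- what changed: Replaces A's single-pass seven-accumulator if/elif loop by staged passes: validate the id set up front (set-inclusion against {13,15,16,17,3,2}), then compute each component as an independent filtered sum over desc and the total as a plain sum, with no running state at all.
import Mathlib
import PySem

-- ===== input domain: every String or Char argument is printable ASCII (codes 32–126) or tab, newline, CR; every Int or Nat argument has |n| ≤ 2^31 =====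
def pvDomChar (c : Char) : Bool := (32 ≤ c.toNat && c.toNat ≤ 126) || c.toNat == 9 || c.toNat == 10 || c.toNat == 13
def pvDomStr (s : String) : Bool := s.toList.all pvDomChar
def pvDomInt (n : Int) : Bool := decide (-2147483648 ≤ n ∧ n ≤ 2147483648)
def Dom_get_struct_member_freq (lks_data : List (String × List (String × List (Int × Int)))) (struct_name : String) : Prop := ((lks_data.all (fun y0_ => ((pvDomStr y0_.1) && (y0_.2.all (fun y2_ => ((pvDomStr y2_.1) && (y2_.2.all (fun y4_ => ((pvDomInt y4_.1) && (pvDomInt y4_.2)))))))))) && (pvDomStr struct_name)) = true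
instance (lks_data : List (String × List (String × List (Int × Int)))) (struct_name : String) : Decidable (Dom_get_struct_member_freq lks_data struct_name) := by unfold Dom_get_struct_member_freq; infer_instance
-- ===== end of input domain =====

-- B replaces A's single-pass seven-accumulator loop by staged passes: validate the id set
-- up front, then compute each component as an independent filtered sum (no running state).

-- ===== PORT A =====
-- A's for-loop over data["desc"]: seven accumulators; 'none' marks the 'raise Exception("Unknown Type")' path.
def pvLoopA : List (Int × Int) → Int → Int → Int → Int → Int → Int → Int →
    Option (Int × Int × Int × Int × Int × Int × Int)
  | [], i, p, s, a, d, f, t => some (i, p, s, a, d, f, t)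
  | (idnum, fr) :: rest, i, p, s, a, d, f, t =>
    let t' := t + fr
    if idnum = 13 then pvLoopA rest (i + fr) p s a d f t'
    else if idnum = 15 then pvLoopA rest i (p + fr) s a d f t'
    else if idnum = 16 then pvLoopA rest i p (s + fr) a d f t'
    else if idnum = 17 then pvLoopA rest i p s (a + fr) d f t'
    else if idnum = 3 then pvLoopA rest i p s a (d + fr) f t'
    else if idnum = 2 then pvLoopA rest i p s a d (f + fr) t'
    else none

def get_struct_member_freq (lks_data : List (String × List (String × List (Int × Int)))) (struct_name : String) : Int × Int × Int × Int × Int × Int × Int :=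
  if struct_name = "" then (0, 0, 0, 0, 0, 0, 0)
  else
    match (PySem.Dict.mk lks_data).get? struct_name with
    | none => (0, 0, 0, 0, 0, 0, 0)   -- KeyError in Python; excluded by Pre_
    | some data =>
      match (PySem.Dict.mk data).get? "desc" with
      | none => (0, 0, 0, 0, 0, 0, 0) -- KeyError in Python; excluded by Pre_
      | some desc => (pvLoopA desc 0 0 0 0 0 0 0).getD (0, 0, 0, 0, 0, 0, 0) -- none = raise, excluded by Pre_

-- ===== PORT B =====
-- sum(f for i, f in desc if i == code)
def pvTallyB (desc : List (Int × Int)) (code : Int) : Int :=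
  ((desc.filter (fun p => p.1 == code)).map Prod.snd).sum

def get_struct_member_freq_alt (lks_data : List (String × List (String × List (Int × Int)))) (struct_name : String) : Int × Int × Int × Int × Int × Int × Int :=
  let desc := if struct_name = "" then []
    else (((PySem.Dict.mk lks_data).get? struct_name).bind
            (fun d => (PySem.Dict.mk d).get? "desc")).getD []   -- KeyError in Python; excluded by Pre_
  if PySem.Set.issubset (PySem.Set.ofList (desc.map Prod.fst))
       (PySem.Set.ofList [(13 : Int), 15, 16, 17, 3, 2]) then
    (pvTallyB desc 13, pvTallyB desc 15, pvTallyB desc 16,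
     pvTallyB desc 17, pvTallyB desc 3, pvTallyB desc 2, (desc.map Prod.snd).sum)
  else (0, 0, 0, 0, 0, 0, 0)          -- raise Exception("Unknown Type"); excluded by Pre_

-- ===== PRECONDITION & SPEC =====
-- Pre_ excludes exactly the inputs where A raises: a non-empty struct_name missing from lks_data
-- (or its entry missing "desc") → KeyError, and any member id outside {13,15,16,17,3,2} → Exception.
def Pre_get_struct_member_freq (lks_data : List (String × List (String × List (Int × Int)))) (struct_name : String) : Prop :=
  struct_name = "" ∨
    (match ((PySem.Dict.mk lks_data).get? struct_name).bind
             (fun d => (PySem.Dict.mk d).get? "desc") with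
     | none => false
     | some desc => desc.all (fun p => p.1 == 13 || p.1 == 15 || p.1 == 16 || p.1 == 17 || p.1 == 3 || p.1 == 2)) = true
instance (lks_data : List (String × List (String × List (Int × Int)))) (struct_name : String) : Decidable (Pre_get_struct_member_freq lks_data struct_name) := by unfold Pre_get_struct_member_freq; infer_instance

def pvWitness_get_struct_member_freq : (List (String × List (String × List (Int × Int)))) × String :=
  ([("s", [("desc", [(13, 2), (15, 1), (13, 3), (2, 4)])])], "s")

def Spec_get_struct_member_freq (lks_data : List (String × List (String × List (Int × Int)))) (struct_name : String) (out : Int × Int × Int × Int × Int × Int × Int) : Prop := out = get_struct_member_freq_alt lks_data struct_name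
instance (lks_data : List (String × List (String × List (Int × Int)))) (struct_name : String) (out : Int × Int × Int × Int × Int × Int × Int) : Decidable (Spec_get_struct_member_freq lks_data struct_name out) := by unfold Spec_get_struct_member_freq; infer_instance

-- ===== CLAIM =====
def Claim_equal_get_struct_member_freq : Prop := ∀ (lks_data : List (String × List (String × List (Int × Int)))) (struct_name : String), Dom_get_struct_member_freq lks_data struct_name → Pre_get_struct_member_freq lks_data struct_name → Spec_get_struct_member_freq lks_data struct_name (get_struct_member_freq lks_data struct_name)

-- ===== LEMMAS AND PROOFS =====

-- per-id frequency sum and total frequency of a desc list (proof-side characterisations)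
def pvCnt (k : Int) : List (Int × Int) → Int
  | [] => 0
  | p :: r => (if p.1 = k then p.2 else 0) + pvCnt k r

def pvTot : List (Int × Int) → Int
  | [] => 0
  | p :: r => p.2 + pvTot r

lemma pvLoopA_eq (desc : List (Int × Int))
    (h : ∀ p ∈ desc, p.1 = 13 ∨ p.1 = 15 ∨ p.1 = 16 ∨ p.1 = 17 ∨ p.1 = 3 ∨ p.1 = 2) :
    ∀ i p s a d f t, pvLoopA desc i p s a d f t =
      some (i + pvCnt 13 desc, p + pvCnt 15 desc, s + pvCnt 16 desc, a + pvCnt 17 desc,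
            d + pvCnt 3 desc, f + pvCnt 2 desc, t + pvTot desc) := by
  induction desc with
  | nil => intro i p s a d f t; simp [pvLoopA, pvCnt, pvTot]
  | cons q rest ih =>
    intro i p s a d f t
    obtain ⟨id, fr⟩ := q
    have hq := h (id, fr) (by simp)
    have hrest : ∀ p ∈ rest, p.1 = 13 ∨ p.1 = 15 ∨ p.1 = 16 ∨ p.1 = 17 ∨ p.1 = 3 ∨ p.1 = 2 :=
      fun p hp => h p (by simp [hp])
    simp only at hq
    rcases hq with h | h | h | h | h | h <;> subst h <;>
      simp [pvLoopA, ih hrest, pvCnt, pvTot, Prod.mk.injEq] <;> omega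

lemma pvTallyB_eq (k : Int) (desc : List (Int × Int)) : pvTallyB desc k = pvCnt k desc := by
  induction desc with
  | nil => simp [pvTallyB, pvCnt]
  | cons q rest ih =>
    by_cases h : q.1 = k <;>
      simp [pvTallyB, pvCnt, h] at ih ⊢ <;> omega

lemma pvSndSum_eq (desc : List (Int × Int)) : (desc.map Prod.snd).sum = pvTot desc := by
  induction desc with
  | nil => simp [pvTot]
  | cons q rest ih => simp [pvTot, ih]

-- ===== VERDICT =====
theorem get_struct_member_freq_spec : Claim_equal_get_struct_member_freq := by
  intro lks_data struct_name _ hpre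
  unfold Spec_get_struct_member_freq
  by_cases hn : struct_name = ""
  · subst hn; rfl
  · rcases hpre with h | h
    · exact absurd h hn
    rcases hb : ((PySem.Dict.mk lks_data).get? struct_name).bind
        (fun d => (PySem.Dict.mk d).get? "desc") with _ | desc
    · rw [hb] at h; simp at h
    rw [hb] at h
    simp only [List.all_eq_true] at h
    have hids : ∀ p ∈ desc, p.1 = 13 ∨ p.1 = 15 ∨ p.1 = 16 ∨ p.1 = 17 ∨ p.1 = 3 ∨ p.1 = 2 := by
      intro p hp
      have := h p hp
      simp only [Bool.or_eq_true, beq_iff_eq] at this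
      tauto
    obtain ⟨data, hd1, hd2⟩ := Option.bind_eq_some_iff.mp hb
    have hA : get_struct_member_freq lks_data struct_name =
        (pvCnt 13 desc, pvCnt 15 desc, pvCnt 16 desc, pvCnt 17 desc, pvCnt 3 desc, pvCnt 2 desc, pvTot desc) := by
      simp [get_struct_member_freq, hn, hd1, hd2, pvLoopA_eq desc hids]
    have hsub : PySem.Set.issubset (PySem.Set.ofList (desc.map Prod.fst))
        (PySem.Set.ofList [(13 : Int), 15, 16, 17, 3, 2]) = true := by
      rw [PySem.Set.issubset_iff]
      intro x hx
      rw [PySem.Set.mem_ofList] at hx ⊢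
      obtain ⟨p, hp, hpk⟩ := List.mem_map.mp hx
      have := hids p hp
      rw [← hpk]
      simp only [List.mem_cons]
      tauto
    have hB : get_struct_member_freq_alt lks_data struct_name =
        (pvCnt 13 desc, pvCnt 15 desc, pvCnt 16 desc, pvCnt 17 desc, pvCnt 3 desc, pvCnt 2 desc, pvTot desc) := by
      have hdesc' : (if struct_name = "" then []
          else (((PySem.Dict.mk lks_data).get? struct_name).bind
                  (fun d => (PySem.Dict.mk d).get? "desc")).getD []) = desc := by
        simp [hn, hb]
      simp only [get_struct_member_freq_alt]
      rw [hdesc', if_pos hsub]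
      simp [pvTallyB_eq, pvSndSum_eq]
    rw [hA, hB]
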